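-- pv_equiv track=rewrite | github.com/paolo-notaro/advent-of-code-2024 | 09/part1.py | generate_disk
-- ===== SOURCE A (Python) =====
-- def generate_disk(dense_disk: list[int]):
--     disk = []
--     file_id = 0
--     for i, n_blocks in enumerate(dense_disk):
--         if i % 2 == 0:
--             disk += [file_id] * n_blocks
--             file_id += 1
--         else:
--             disk += [None] * n_blocks
--     return disk
-- ===== SOURCE B (Python) =====
-- def generate_disk(dense_disk: list[int]):
--     disk = []
--     n = len(dense_disk)
--     for i in range(0, n, 2):
--         file_len = dense_disk[i]
--         free_len = dense_disk[i + 1] if i + 1 < n else 0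
--         disk += [i // 2] * file_len + [None] * free_len
--     return disk
-- ===== Notes on version B (the rewrite author's own statement) =====
-- stated objective: idiomatic
-- what changed: B iterates over (file_len, free_len) pairs via range(0, n, 2), computing the file id as i // 2, instead of A's per-element loop with an i % 2 parity branch and a manually incremented file_id counter.
import Mathlib
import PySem

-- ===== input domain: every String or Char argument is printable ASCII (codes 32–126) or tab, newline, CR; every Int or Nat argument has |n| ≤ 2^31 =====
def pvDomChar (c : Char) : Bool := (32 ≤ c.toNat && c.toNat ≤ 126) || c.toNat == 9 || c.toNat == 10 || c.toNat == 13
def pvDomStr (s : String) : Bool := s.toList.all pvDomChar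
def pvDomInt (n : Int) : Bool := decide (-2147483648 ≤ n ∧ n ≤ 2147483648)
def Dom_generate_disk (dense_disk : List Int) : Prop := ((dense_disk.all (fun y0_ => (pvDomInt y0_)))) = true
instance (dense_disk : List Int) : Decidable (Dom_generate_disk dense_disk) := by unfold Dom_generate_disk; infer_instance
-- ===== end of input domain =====

-- B walks the dense layout pair-by-pair with range(0, n, 2), deriving the file id as i // 2,
-- instead of A's per-element loop with a parity test and a running file_id counter (objective: more idiomatic).

-- ===== PORT A =====
def generate_disk (dense_disk : List Int) : List (Option Int) :=
  let st := (PySem.List.enumerate dense_disk).foldl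
    (fun (st : List (Option Int) × Int) iv =>
      if PySem.Int.mod iv.1 2 = 0 then
        (st.1 ++ List.replicate iv.2.toNat (some st.2), st.2 + 1)
      else
        (st.1 ++ List.replicate iv.2.toNat none, st.2))
    ([], 0)
  st.1

-- ===== PORT B =====
def generate_disk_alt (dense_disk : List Int) : List (Option Int) :=
  let n : Int := dense_disk.length
  (PySem.List.pyRange 0 n 2).foldl
    (fun disk i =>
      let file_len := PySem.List.pyGetD dense_disk i 0
      let free_len := if i + 1 < n then PySem.List.pyGetD dense_disk (i + 1) 0 else 0
      disk ++ (List.replicate file_len.toNat (some (PySem.Int.floordiv i 2))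
               ++ List.replicate free_len.toNat none))
    []

-- ===== PRECONDITION & SPEC =====
def Spec_generate_disk (dense_disk : List Int) (out : List (Option Int)) : Prop := out = generate_disk_alt dense_disk
instance (dense_disk : List Int) (out : List (Option Int)) : Decidable (Spec_generate_disk dense_disk out) := by unfold Spec_generate_disk; infer_instance

-- ===== CLAIM (what is proved, stated in full; the proofs are below) =====
def Claim_equal_generate_disk : Prop := ∀ (dense_disk : List Int), Dom_generate_disk dense_disk → Spec_generate_disk dense_disk (generate_disk dense_disk)

-- ===== LEMMAS AND PROOFS =====

-- common normal form: expand pairs (file_len, free_len) with file id fid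
def pvSpec : List Int → Int → List (Option Int)
  | [], _ => []
  | [a], fid => List.replicate a.toNat (some fid)
  | a :: b :: rest, fid =>
      List.replicate a.toNat (some fid) ++ List.replicate b.toNat none ++ pvSpec rest (fid + 1)

theorem pvMod_even (s : Int) (hs : s % 2 = 0) : PySem.Int.mod s 2 = 0 := by
  simp [PySem.Int.mod, Int.fmod_eq_emod]; omega

theorem pvMod_odd (s : Int) (hs : s % 2 = 0) : ¬ PySem.Int.mod (s + 1) 2 = 0 := by
  simp [PySem.Int.mod, Int.fmod_eq_emod]; omega

theorem pvA_loop : ∀ (l : List Int) (s : Int), s % 2 = 0 → ∀ (acc : List (Option Int)) (fid : Int),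
    ((PySem.List.enumerate l s).foldl
      (fun (st : List (Option Int) × Int) iv =>
        if PySem.Int.mod iv.1 2 = 0 then
          (st.1 ++ List.replicate iv.2.toNat (some st.2), st.2 + 1)
        else
          (st.1 ++ List.replicate iv.2.toNat none, st.2))
      (acc, fid)).1 = acc ++ pvSpec l fid
  | [], s, hs, acc, fid => by simp [PySem.List.enumerate, pvSpec]
  | [a], s, hs, acc, fid => by
      simp only [PySem.List.enumerate, List.foldl_cons, List.foldl_nil]
      rw [if_pos (pvMod_even s hs)]
      simp [pvSpec]
  | a :: b :: rest, s, hs, acc, fid => by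
      have h2 : (s + 2) % 2 = 0 := by omega
      simp only [PySem.List.enumerate, List.foldl_cons]
      rw [if_pos (pvMod_even s hs), if_neg (pvMod_odd s hs)]
      rw [show s + 1 + 1 = s + 2 by ring, pvA_loop rest (s + 2) h2]
      simp [pvSpec, List.append_assoc]

theorem pvRange_pos_nil (a b s : Int) (hs : 0 < s) (h : b ≤ a) : PySem.List.pyRange a b s = [] := by
  rw [PySem.List.pyRange_of_pos a b hs, if_neg (by omega)]
  simp

theorem pvRange_two_cons (a b : Int) (h : a < b) :
    PySem.List.pyRange a b 2 = a :: PySem.List.pyRange (a + 2) b 2 := by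
  rw [PySem.List.pyRange_of_pos a b (by norm_num), PySem.List.pyRange_of_pos (a + 2) b (by norm_num)]
  have hc : (if a < b then ((b - a + 2 - 1) / 2).toNat else 0)
      = (if a + 2 < b then ((b - (a + 2) + 2 - 1) / 2).toNat else 0) + 1 := by
    split_ifs <;> omega
  rw [hc, List.range_succ_eq_map]
  simp only [List.map_cons, List.map_map, Nat.cast_zero, mul_zero, add_zero]
  refine congrArg₂ List.cons rfl (List.map_congr_left ?_)
  intro k _
  simp only [Function.comp]
  push_cast
  ring

theorem pvB_loop : ∀ (l d : List Int) (j : Nat), d.drop j = l → ∀ (acc : List (Option Int)),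
    ((PySem.List.pyRange (j : Int) (d.length : Int) 2).foldl
      (fun disk i =>
        let file_len := PySem.List.pyGetD d i 0
        let free_len := if i + 1 < (d.length : Int) then PySem.List.pyGetD d (i + 1) 0 else 0
        disk ++ (List.replicate file_len.toNat (some (PySem.Int.floordiv i 2))
                 ++ List.replicate free_len.toNat none))
      acc) = acc ++ pvSpec l (PySem.Int.floordiv (j : Int) 2)
  | [], d, j, hd, acc => by
      have hle : d.length ≤ j := by
        by_contra hlt
        have := List.drop_eq_nil_iff.mp hd
        omega
      rw [pvRange_pos_nil _ _ _ (by norm_num) (by exact_mod_cast hle)]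
      simp [pvSpec]
  | [a], d, j, hd, acc => by
      have hlen : d.length = j + 1 := by
        have := congrArg List.length hd
        simp [List.length_drop] at this
        omega
      have hj : (j : Int) < d.length := by omega
      have hget : PySem.List.pyGetD d (j : Int) 0 = a := by
        have h1 : d[j]? = some a := by
          have := congrArg (fun t : List Int => t[0]?) hd
          simpa using this
        simp [List.getD, h1]
      rw [pvRange_two_cons _ _ hj]
      simp only [List.foldl_cons]
      rw [pvRange_pos_nil _ _ _ (by norm_num) (by omega)]
      rw [hget, if_neg (by omega)]
      simp [pvSpec]
  | a :: b :: rest', d, j, hd, acc => by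
      have hlen : d.length = j + 2 + rest'.length := by
        have := congrArg List.length hd
        simp [List.length_drop] at this
        omega
      have hj : (j : Int) < d.length := by omega
      have hget : PySem.List.pyGetD d (j : Int) 0 = a := by
        have h1 : d[j]? = some a := by
          have := congrArg (fun t : List Int => t[0]?) hd
          simpa using this
        simp [List.getD, h1]
      have hget2 : PySem.List.pyGetD d ((j : Int) + 1) 0 = b := by
        have h1 : d[j + 1]? = some b := by
          have := congrArg (fun t : List Int => t[1]?) hd
          simpa using this
        rw [PySem.List.pyGetD_eq_getElem d 0 (by omega) (by omega)]
        obtain ⟨hh, he⟩ := List.getElem?_eq_some_iff.mp h1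
        have ht : ((j : Int) + 1).toNat = j + 1 := by omega
        simp only [ht]
        exact he
      rw [pvRange_two_cons _ _ hj]
      simp only [List.foldl_cons]
      rw [hget, if_pos (by omega), hget2]
      rw [show ((j : Int) + 2) = ((j + 2 : Nat) : Int) by push_cast; ring]
      rw [pvB_loop rest' d (j + 2) (by rw [← List.drop_drop, hd]; rfl)]
      have hfid : PySem.Int.floordiv ((j + 2 : Nat) : Int) 2 = PySem.Int.floordiv (j : Int) 2 + 1 := by
        simp only [PySem.Int.floordiv, Int.fdiv_eq_ediv]
        push_cast
        rw [show ((j : Int) + 2) = (j : Int) + 1 * 2 by ring,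
          Int.add_mul_ediv_right _ _ (by norm_num : (2 : Int) ≠ 0)]
        simp
      rw [hfid]
      simp [pvSpec, List.append_assoc]

-- ===== VERDICT (by name: the statement is the Claim_ definition above) =====
theorem generate_disk_spec : Claim_equal_generate_disk := by
  intro d _
  unfold Spec_generate_disk
  have hA : generate_disk d = pvSpec d 0 := pvA_loop d 0 (by norm_num) [] 0
  have hB : generate_disk_alt d = pvSpec d 0 := pvB_loop d d 0 rfl []
  rw [hA, hB]
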